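-- pv_equiv track=rewrite | github.com/idleh4021/study-algorithm | Python3/프로그래머스/0/181943. 문자열 겹쳐쓰기/문자열 겹쳐쓰기.py | solution
-- ===== SOURCE A (Python) =====
-- def solution(my_string, overwrite_string, s):
--     answer =''
--     list_str = list(my_string)
--     for idx,c in enumerate(list(my_string)):
--
--         if idx>=s and idx<s+len(overwrite_string):
--             list_str[idx]=overwrite_string[idx-s]
--         else: continue
--
--     answer = ''.join(list_str)
--     return answer
-- ===== SOURCE B (Python) =====
-- def solution(my_string, overwrite_string, s):
--     n = len(my_string)
--     lo = max(s, 0)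
--     hi = min(s + len(overwrite_string), n)
--     if lo >= hi:
--         return my_string
--     return my_string[:lo] + overwrite_string[lo - s:hi - s] + my_string[hi:]
-- ===== Notes on version B (the rewrite author's own statement) =====
-- stated objective: simpler
-- what changed: Replaces the list-materialise-and-enumerate loop (per-character index test and in-place assignment) with a single closed-form slice concatenation: prefix + clamped middle of overwrite_string + suffix.
import Mathlib
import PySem

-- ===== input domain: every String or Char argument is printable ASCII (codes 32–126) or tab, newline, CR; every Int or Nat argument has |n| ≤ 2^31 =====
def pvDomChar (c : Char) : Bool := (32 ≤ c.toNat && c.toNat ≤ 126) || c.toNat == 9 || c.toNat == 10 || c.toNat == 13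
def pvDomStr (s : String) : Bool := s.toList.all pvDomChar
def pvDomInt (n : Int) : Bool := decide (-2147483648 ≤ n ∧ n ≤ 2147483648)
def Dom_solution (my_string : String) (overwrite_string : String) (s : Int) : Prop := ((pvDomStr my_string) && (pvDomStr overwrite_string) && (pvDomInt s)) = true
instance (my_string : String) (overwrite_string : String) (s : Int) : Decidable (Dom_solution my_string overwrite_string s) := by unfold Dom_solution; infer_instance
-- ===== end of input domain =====

-- B replaces A's enumerate loop with one slice-concatenation expression (objective: simpler); no speed claim.

-- ===== PORT A =====
def solution (my_string : String) (overwrite_string : String) (s : Int) : String :=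
  let list_str := my_string.toList
  let res := (PySem.List.enumerate my_string.toList 0).foldl
    (fun ls p =>
      if s ≤ p.1 ∧ p.1 < s + (overwrite_string.toList.length : Int) then
        PySem.List.pySetD ls p.1 (PySem.List.pyGetD overwrite_string.toList (p.1 - s) p.2)
      else ls) list_str
  String.ofList res

-- ===== PORT B =====
def solution_alt (my_string : String) (overwrite_string : String) (s : Int) : String :=
  let n : Int := my_string.toList.length
  let lo : Int := max s 0
  let hi : Int := min (s + (overwrite_string.toList.length : Int)) n
  if lo ≥ hi then my_string
  else String.ofList
    (PySem.List.slice my_string.toList none (some lo)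
      ++ PySem.List.slice overwrite_string.toList (some (lo - s)) (some (hi - s))
      ++ PySem.List.slice my_string.toList (some hi) none)

-- ===== PRECONDITION & SPEC =====
def Spec_solution (my_string : String) (overwrite_string : String) (s : Int) (out : String) : Prop := out = solution_alt my_string overwrite_string s
instance (my_string : String) (overwrite_string : String) (s : Int) (out : String) : Decidable (Spec_solution my_string overwrite_string s out) := by unfold Spec_solution; infer_instance

-- ===== CLAIM (what is proved, stated in full; the proofs are below) =====
def Claim_equal_solution : Prop := ∀ (my_string : String) (overwrite_string : String) (s : Int), Dom_solution my_string overwrite_string s → Spec_solution my_string overwrite_string s (solution my_string overwrite_string s)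

-- ===== LEMMAS AND PROOFS =====

-- the per-position value A's loop writes
def pvG (ow : List Char) (s : Int) (i : Nat) (c : Char) : Char :=
  if s ≤ (i : Int) ∧ (i : Int) < s + (ow.length : Int) then
    PySem.List.pyGetD ow ((i : Int) - s) c
  else c

-- A's loop, run over the suffix xs of the list with prefix l₁ already processed,
-- rewrites each position in place to pvG of its index.
theorem foldA (ow : List Char) (s : Int) :
    ∀ (xs l₁ : List Char),
      (PySem.List.enumerate xs (l₁.length : Int)).foldl
        (fun ls p =>
          if s ≤ p.1 ∧ p.1 < s + (ow.length : Int) then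
            PySem.List.pySetD ls p.1 (PySem.List.pyGetD ow (p.1 - s) p.2)
          else ls) (l₁ ++ xs)
      = l₁ ++ xs.mapIdx (fun j c => pvG ow s (l₁.length + j) c) := by
  intro xs
  induction xs with
  | nil => intro l₁; simp [PySem.List.enumerate_nil]
  | cons x xs ih =>
    intro l₁
    rw [PySem.List.enumerate_cons, List.foldl_cons]
    have hstep :
        (if s ≤ (l₁.length : Int) ∧ (l₁.length : Int) < s + (ow.length : Int) then
            PySem.List.pySetD (l₁ ++ x :: xs) (l₁.length : Int)
              (PySem.List.pyGetD ow ((l₁.length : Int) - s) x)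
          else l₁ ++ x :: xs)
        = (l₁ ++ [pvG ow s l₁.length x]) ++ xs := by
      by_cases h : s ≤ (l₁.length : Int) ∧ (l₁.length : Int) < s + (ow.length : Int)
      · simp only [h, pvG, PySem.List.pySetD_natCast]
        rw [List.set_append_right _ _ (le_refl _)]
        simp
      · simp [h, pvG]
    simp only [hstep]
    have hlen : ((l₁ ++ [pvG ow s l₁.length x]).length : Int) = (l₁.length : Int) + 1 := by
      simp
    rw [← hlen, ih (l₁ ++ [pvG ow s l₁.length x])]
    simp [List.mapIdx_cons]
    congr 1
    funext i c
    congr 1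
    omega

theorem solution_eq_mapIdx (my ow : List Char) (s : Int) :
    (PySem.List.enumerate my 0).foldl
      (fun ls p =>
        if s ≤ p.1 ∧ p.1 < s + (ow.length : Int) then
          PySem.List.pySetD ls p.1 (PySem.List.pyGetD ow (p.1 - s) p.2)
        else ls) my
    = my.mapIdx (fun j c => pvG ow s j c) := by
  have := foldA ow s my []
  simpa using this

-- B's slice concatenation equals the same mapIdx characterisation.
theorem alt_list_eq_mapIdx (my ow : List Char) (s : Int)
    (hlt : max s 0 < min (s + (ow.length : Int)) (my.length : Int)) :
    PySem.List.slice my none (some (max s 0))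
      ++ PySem.List.slice ow (some (max s 0 - s)) (some (min (s + (ow.length : Int)) (my.length : Int) - s))
      ++ PySem.List.slice my (some (min (s + (ow.length : Int)) (my.length : Int))) none
    = my.mapIdx (fun j c => pvG ow s j c) := by
  set lo : Int := max s 0 with hlo
  set hi : Int := min (s + (ow.length : Int)) (my.length : Int) with hhi
  have h0lo : 0 ≤ lo := le_max_right _ _
  have h0hi : 0 ≤ hi := le_of_lt (lt_of_le_of_lt h0lo hlt)
  have hslo : 0 ≤ lo - s := by omega
  have hshi : 0 ≤ hi - s := by omega
  have hhin : hi ≤ (my.length : Int) := min_le_right _ _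
  have hlohi : lo ≤ hi := le_of_lt hlt
  rw [PySem.List.slice_to _ h0lo, PySem.List.slice_from _ h0hi,
      PySem.List.slice_toNat _ hslo hshi]
  apply List.ext_getElem
  · simp
    omega
  · intro i h1 h2
    have hiN : i < my.length := by simpa using h2
    have hlen1 : (my.take lo.toNat).length = lo.toNat := by simp; omega
    have hlen2 : ((ow.drop (lo - s).toNat).take ((hi - s).toNat - (lo - s).toNat)).length
        = hi.toNat - lo.toNat := by simp; omega
    rw [List.getElem_mapIdx]
    by_cases c1 : i < lo.toNat
    · rw [List.getElem_append_left (by simp [List.length_append, hlen1, hlen2]; omega),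
          List.getElem_append_left (by rw [hlen1]; omega)]
      rw [List.getElem_take]
      have : ¬ (s ≤ (i : Int) ∧ (i : Int) < s + (ow.length : Int)) := by
        rcases (max_choice s 0) with h | h <;> omega
      simp [pvG, this]
    · by_cases c2 : i < hi.toNat
      · rw [List.getElem_append_left (by simp [List.length_append, hlen1, hlen2]; omega),
            List.getElem_append_right (by rw [hlen1]; omega)]
        rw [List.getElem_take, List.getElem_drop]
        have hcond : s ≤ (i : Int) ∧ (i : Int) < s + (ow.length : Int) := by
          constructor <;> omega
        simp only [pvG, if_pos hcond]
        rw [PySem.List.pyGetD_eq_getElem _ _ (by omega) (by omega)]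
        congr 1
        rw [hlen1]
        omega
      · rw [List.getElem_append_right (by simp [List.length_append, hlen1, hlen2]; omega)]
        rw [List.getElem_drop]
        have : ¬ (s ≤ (i : Int) ∧ (i : Int) < s + (ow.length : Int)) := by
          rcases (min_choice (s + (ow.length : Int)) (my.length : Int)) with h | h <;> omega
        simp only [pvG, if_neg this]
        congr 1
        simp only [List.length_append, hlen1, hlen2]
        omega

theorem mapIdx_id_of_empty (my ow : List Char) (s : Int)
    (hge : min (s + (ow.length : Int)) (my.length : Int) ≤ max s 0) :
    my.mapIdx (fun j c => pvG ow s j c) = my := by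
  apply List.ext_getElem
  · simp
  · intro i h1 h2
    rw [List.getElem_mapIdx]
    have hiN : i < my.length := by simpa using h2
    have : ¬ (s ≤ (i : Int) ∧ (i : Int) < s + (ow.length : Int)) := by
      rcases (max_choice s 0) with h | h <;>
        rcases (min_choice (s + (ow.length : Int)) (my.length : Int)) with h' | h' <;> omega
    simp [pvG, this]

-- ===== VERDICT (by name: the statement is the Claim_ definition above) =====
theorem solution_spec : Claim_equal_solution := by
  intro my_string overwrite_string s _
  unfold Spec_solution solution solution_alt
  simp only []
  rw [solution_eq_mapIdx]
  by_cases h : max s 0 ≥ min (s + (overwrite_string.toList.length : Int)) (my_string.toList.length : Int)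
  · rw [if_pos h, mapIdx_id_of_empty _ _ _ h]
    exact String.ofList_toList
  · rw [if_neg h]
    rw [alt_list_eq_mapIdx _ _ _ (by omega)]
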